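-- pv_equiv track=rewrite | github.com/luzalbaposse/TD-1-IntroduccionALaProgramacion | Material/clases-practicas/P08/Soluciones/funciones-solucion.py | suma_en_posiciones_impares
-- ===== SOURCE A (Python) =====
-- from typing import List
--
-- def suma_en_posiciones_impares(l: List[int], n: int) -> List[int]:
--     ''' Suma n a los números que están en posiciones impares de l.
--     Requiere: nada
--     Devuelve: len(vr)==len(l), y en toda posición j entre 0 y len(l)-1:
--           vr[j]==l[j] si j es par, o bien vr[j]==l[j]+n si j es impar.
--
--     INVARIANTE:
--     - 0 <= i <= len(l)
--     - len(vr) == i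
--     - Para j entre 0 e i-1, vr[j] == l[j] si j es par y vr[j] == l[j]+n si j
--       es impar
--     '''
--     vr: List[int] = []
--     i: int = 0
--     # (A)
--     while i < len(l):
--         # (B)
--         if i % 2 == 0:
--             vr.append(l[i])
--         else:
--             vr.append(l[i] + n)
--         i = i + 1
--         # (C)
--     # (D)
--     return vr
-- ===== SOURCE B (Python) =====
-- from typing import List
--
-- def suma_en_posiciones_impares(l: List[int], n: int) -> List[int]:
--     vr: List[int] = list(l)
--     vr[1::2] = [x + n for x in vr[1::2]]
--     return vr
-- ===== Notes on version B (the rewrite author's own statement) =====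
-- stated objective: idiomatic
-- what changed: Replaces the index-counting while loop with its per-index parity branch by a shallow copy followed by a strided slice-assignment that rewrites only the odd positions, with no index test at all.
import Mathlib
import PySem

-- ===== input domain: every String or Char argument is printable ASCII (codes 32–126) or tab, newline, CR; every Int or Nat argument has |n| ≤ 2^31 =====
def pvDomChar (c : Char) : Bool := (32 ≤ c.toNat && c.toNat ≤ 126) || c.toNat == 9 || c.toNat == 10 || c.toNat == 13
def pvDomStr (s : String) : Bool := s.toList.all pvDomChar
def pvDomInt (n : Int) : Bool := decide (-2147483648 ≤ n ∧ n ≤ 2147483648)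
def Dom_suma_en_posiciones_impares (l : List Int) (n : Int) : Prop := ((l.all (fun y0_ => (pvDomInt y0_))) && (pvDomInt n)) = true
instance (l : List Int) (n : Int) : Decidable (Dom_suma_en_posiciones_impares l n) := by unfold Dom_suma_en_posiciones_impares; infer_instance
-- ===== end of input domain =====

-- B replaces A's index-by-index parity loop by a copy plus a stride-2 slice rewrite of the odd positions (idiomatic; measured faster by a constant factor).
-- ===== PORT A =====
-- while i < len(l): append l[i] (even i) or l[i]+n (odd i); i += 1
def pvALoop (l : List Int) (n : Int) (vr : List Int) (i : Nat) : List Int :=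
  if h : i < l.length then
    pvALoop l n (vr ++ [if i % 2 == 0 then l[i] else l[i] + n]) (i + 1)
  else vr
termination_by l.length - i

def suma_en_posiciones_impares (l : List Int) (n : Int) : List Int :=
  pvALoop l n [] 0

-- ===== PORT B =====
-- vr[1::2]: the stride-2-from-1 slice read (exact for start 1, step 2 on a list)
def pvOddSlice : List Int → List Int
  | [] => []
  | [_] => []
  | _ :: b :: r => b :: pvOddSlice r

-- vr[1::2] = ys: slice assignment writing ys back into the odd positions
-- (exact here: ys always has the slice's length)
def pvOddAssign : List Int → List Int → List Int
  | [], _ => []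
  | [a], _ => [a]
  | a :: b :: r, [] => a :: b :: r
  | a :: b :: r, y :: ys => a :: y :: pvOddAssign r ys

def suma_en_posiciones_impares_alt (l : List Int) (n : Int) : List Int :=
  let vr := l
  pvOddAssign vr ((pvOddSlice vr).map (fun x => x + n))

-- ===== PRECONDITION & SPEC =====
def Spec_suma_en_posiciones_impares (l : List Int) (n : Int) (out : List Int) : Prop := out = suma_en_posiciones_impares_alt l n
instance (l : List Int) (n : Int) (out : List Int) : Decidable (Spec_suma_en_posiciones_impares l n out) := by unfold Spec_suma_en_posiciones_impares; infer_instance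

-- ===== CLAIM (what is proved, stated in full; the proofs are below) =====
def Claim_equal_suma_en_posiciones_impares : Prop := ∀ (l : List Int) (n : Int), Dom_suma_en_posiciones_impares l n → Spec_suma_en_posiciones_impares l n (suma_en_posiciones_impares l n)

-- ===== LEMMAS AND PROOFS =====

-- ===== VERDICT (by name: the statement is the Claim_ definition above) =====
-- spec of A's loop body applied pointwise, carrying the running index
def pvG (n : Int) : List Int → Nat → List Int
  | [], _ => []
  | a :: t, i => (if i % 2 == 0 then a else a + n) :: pvG n t (i + 1)

theorem pvALoop_eq_g (l : List Int) (n : Int) (vr : List Int) (i : Nat) :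
    pvALoop l n vr i = vr ++ pvG n (l.drop i) i := by
  induction vr, i using pvALoop.induct (l := l) (n := n) with
  | case1 vr i h ih =>
      rw [pvALoop, dif_pos h]
      simp only [dite_eq_ite] at ih ⊢
      rw [ih, List.drop_eq_getElem_cons h, pvG, List.append_assoc]
      rfl
  | case2 vr i h =>
      rw [pvALoop, dif_neg h, List.drop_of_length_le (by omega), pvG, List.append_nil]

theorem pvG_eq_alt (n : Int) :
    ∀ (l : List Int) (i : Nat), i % 2 = 0 →
      pvG n l i = pvOddAssign l ((pvOddSlice l).map (fun x => x + n))
  | [], _, _ => rfl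
  | [a], i, hi => by simp [pvG, pvOddAssign, hi]
  | a :: b :: r, i, hi => by
      have h1 : (i + 1) % 2 ≠ 0 := by omega
      simp [pvG, pvOddSlice, pvOddAssign, hi, h1, pvG_eq_alt n r (i + 2) (by omega)]

theorem suma_en_posiciones_impares_spec : Claim_equal_suma_en_posiciones_impares := by
  intro l n _
  unfold Spec_suma_en_posiciones_impares suma_en_posiciones_impares suma_en_posiciones_impares_alt
  rw [pvALoop_eq_g, List.drop_zero, List.nil_append, pvG_eq_alt n l 0 rfl]
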